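-- pv_equiv track=rewrite | github.com/dgsim126/Algo_Study_2 | Programmers/심동근/2505/250523/나무 높이 gpt.py | solution
-- ===== SOURCE A (Python) =====
-- def solution(N, trees):
--     # 가장 큰 나무 높이를 찾음 (모든 나무를 이 높이까지 자라게 해야 함)
--     max_height = max(trees)
--
--     even = 0  # 2단씩 자라는 날에 필요한 횟수 누적
--     odd = 0   # 1단씩 자라는 날에 필요한 횟수 누적
--
--     for t in trees:
--         diff = max_height - t  # 각 나무가 자라야 할 높이 차이
--
--         even += diff // 2      # 2단씩 자라게 하는 날에 필요한 횟수 누적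
--         odd += diff % 2        # 나머지 1단씩 자라야 하는 날은 odd에 누적
--
--     # 그리디하게 자라게 하되, 번갈아가며 1과 2를 쓰는 방식으로 최적화가 필요
--     # 2단 자람이 1단 자람보다 많을 때는, 2를 줄이고 1을 늘려서 균형을 맞춤
--     # 이는 "2, 2"를 "1, 1, 1"로 바꿔서 더 나은 방식으로 일 수를 줄이기 위함
--     if even > odd:
--         while abs(even - odd) > 1:
--             even -= 1
--             odd += 2  # 2단 자람 1회를 없애고 1단 자람 2회로 대체 (실질적으로 더 효율적인 구조)
--
--     # 최종적으로 결과 계산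
--     if odd > even:
--         # 1단 자람이 많다면, "1, 2, 1, 2..." 형태로 진행되기 때문에
--         # 1단 자람 수 * 2 - 1 (마지막에 1만 쓰고 끝낼 수 있음)
--         result = odd * 2 - 1
--     elif even > odd:
--         # 2단 자람이 많다면, 그냥 2, 2, 2... 형태로 가능하므로 2 * even
--         result = even * 2
--     else:
--         # 1단과 2단 자람 수가 같다면, 1, 2, 1, 2,... 완전히 번갈아 가능
--         result = even + odd
--
--     return result
-- ===== SOURCE B (Python) =====
-- def solution(N, trees):
--     m = max(trees)
--     diffs = [m - t for t in trees]
--     odd = sum(d % 2 for d in diffs)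
--     even = (sum(diffs) - odd) // 2
--     d = even - odd
--     if d > 1:
--         r = d % 3
--         dstar = 0 if r == 0 else (1 if r == 1 else -1)
--         k = (d - dstar) // 3
--         even -= k
--         odd += 2 * k
--     if odd > even:
--         return odd * 2 - 1
--     if even > odd:
--         return even * 2
--     return even + odd
-- ===== Notes on version B (the rewrite author's own statement) =====
-- stated objective: faster
-- what changed: The value-dependent rebalancing while loop (one iteration per unit of even-odd imbalance) is replaced by a closed-form computation of the final even/odd counts via (even-odd) mod 3, and the per-tree even/odd accumulation is replaced by a sum of diffs plus a parity sum.
import Mathlib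
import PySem

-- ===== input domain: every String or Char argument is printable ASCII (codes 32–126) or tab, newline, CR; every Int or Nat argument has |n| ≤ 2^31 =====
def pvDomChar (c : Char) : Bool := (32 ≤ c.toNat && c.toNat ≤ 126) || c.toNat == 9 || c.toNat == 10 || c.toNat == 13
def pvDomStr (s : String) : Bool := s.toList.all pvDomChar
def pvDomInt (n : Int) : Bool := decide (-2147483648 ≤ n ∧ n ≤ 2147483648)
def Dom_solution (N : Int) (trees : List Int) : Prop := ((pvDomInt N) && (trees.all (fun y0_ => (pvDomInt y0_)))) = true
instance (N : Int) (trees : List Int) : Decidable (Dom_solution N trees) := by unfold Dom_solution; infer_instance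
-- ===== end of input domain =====

-- B replaces A's value-dependent rebalancing while loop by closed-form arithmetic (asymptotically faster).

-- ===== PORT A =====
-- the 'while abs(even-odd) > 1: even -= 1; odd += 2' loop; ported with a fuel guard
-- (fuel (even-odd).toNat is enough: each iteration lowers even-odd by 3 and the loop
-- is only entered with even > odd, so it runs at most (even-odd) times)
def solutionLoop : Nat → Int → Int → Int × Int
  | 0, e, o => (e, o)
  | f + 1, e, o => if (e - o).natAbs > 1 then solutionLoop f (e - 1) (o + 2) else (e, o)

def solution (N : Int) (trees : List Int) : Int :=
  match PySem.List.max? trees (fun x => x) with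
  | none => 0   -- Python raises ValueError on max([]); excluded by Pre_solution
  | some max_height =>
    let eo := trees.foldl
      (fun (p : Int × Int) t =>
        (p.1 + PySem.Int.floordiv (max_height - t) 2, p.2 + PySem.Int.mod (max_height - t) 2))
      (0, 0)
    let eo2 := if eo.1 > eo.2 then solutionLoop (eo.1 - eo.2).toNat eo.1 eo.2 else eo
    if eo2.2 > eo2.1 then eo2.2 * 2 - 1
    else if eo2.1 > eo2.2 then eo2.1 * 2
    else eo2.1 + eo2.2

-- ===== PORT B =====
def solution_alt (N : Int) (trees : List Int) : Int :=
  match PySem.List.max? trees (fun x => x) with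
  | none => 0   -- Python raises ValueError on max([]); excluded by Pre_solution
  | some m =>
    let diffs := trees.map (fun t => m - t)
    let odd := (diffs.map (fun d => PySem.Int.mod d 2)).sum
    let even := PySem.Int.floordiv (diffs.sum - odd) 2
    let d := even - odd
    let eo :=
      if d > 1 then
        let r := PySem.Int.mod d 3
        let dstar : Int := if r = 0 then 0 else if r = 1 then 1 else -1
        let k := PySem.Int.floordiv (d - dstar) 3
        (even - k, odd + 2 * k)
      else (even, odd)
    if eo.2 > eo.1 then eo.2 * 2 - 1
    else if eo.1 > eo.2 then eo.1 * 2
    else eo.1 + eo.2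

-- ===== PRECONDITION & SPEC =====
-- A raises ValueError (max of empty sequence) on trees = []; B does too. Excluded.
def Pre_solution (N : Int) (trees : List Int) : Prop := trees ≠ []
instance (N : Int) (trees : List Int) : Decidable (Pre_solution N trees) := by unfold Pre_solution; infer_instance
def pvWitness_solution : Int × List Int := (3, [2, 4, 4])

def Spec_solution (N : Int) (trees : List Int) (out : Int) : Prop := out = solution_alt N trees
instance (N : Int) (trees : List Int) (out : Int) : Decidable (Spec_solution N trees out) := by unfold Spec_solution; infer_instance

-- ===== CLAIM (what is proved, stated in full; the proofs are below) =====
def Claim_equal_solution : Prop := ∀ (N : Int) (trees : List Int), Dom_solution N trees → Pre_solution N trees → Spec_solution N trees (solution N trees)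

-- ===== LEMMAS AND PROOFS =====

-- B's closed-form adjustment, as a standalone pair function (mirrors the inline 'if d > 1' block of solution_alt)
def adjustPair (e o : Int) : Int × Int :=
  if e - o > 1 then
    let r := PySem.Int.mod (e - o) 3
    let dstar : Int := if r = 0 then 0 else if r = 1 then 1 else -1
    let k := PySem.Int.floordiv (e - o - dstar) 3
    (e - k, o + 2 * k)
  else (e, o)

theorem adjustPair_step (e o : Int) (h : 2 ≤ e - o) :
    adjustPair e o = adjustPair (e - 1) (o + 2) := by
  simp only [adjustPair,
    PySem.Int.mod_eq_emod_of_pos (show (0:Int) < 3 by norm_num),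
    PySem.Int.floordiv_eq_ediv_of_pos (show (0:Int) < 3 by norm_num),
    ]
  split_ifs <;> simp only [Prod.mk.injEq] <;> omega

theorem loop_eq_adjust (f : Nat) (e o : Int) (hlo : -1 ≤ e - o) (hhi : e - o ≤ 1 + 3 * f) :
    solutionLoop f e o = adjustPair e o := by
  induction f generalizing e o with
  | zero =>
    show (e, o) = adjustPair e o
    simp only [adjustPair]
    rw [if_neg (by omega)]
  | succ f ih =>
    show (if (e - o).natAbs > 1 then solutionLoop f (e - 1) (o + 2) else (e, o)) = adjustPair e o
    by_cases hc : (e - o).natAbs > 1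
    · rw [if_pos hc]
      have h2 : 2 ≤ e - o := by omega
      rw [ih (e - 1) (o + 2) (by omega) (by omega), adjustPair_step e o h2]
    · rw [if_neg hc]
      simp only [adjustPair]
      rw [if_neg (by omega)]

theorem fold_acc (L : List Int) (m a b : Int) :
    L.foldl (fun (p : Int × Int) t =>
        (p.1 + PySem.Int.floordiv (m - t) 2, p.2 + PySem.Int.mod (m - t) 2)) (a, b)
    = (a + ((L.map (fun t => m - t)).map (fun d => PySem.Int.floordiv d 2)).sum,
       b + ((L.map (fun t => m - t)).map (fun d => PySem.Int.mod d 2)).sum) := by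
  induction L generalizing a b with
  | nil => simp [List.foldl]
  | cons x xs ih =>
    simp only [List.foldl, List.map, List.sum_cons]
    rw [ih]
    apply Prod.ext <;> simp <;> ring

theorem sum_split (diffs : List Int) :
    (diffs.map (fun d => PySem.Int.floordiv d 2)).sum * 2
      + (diffs.map (fun d => PySem.Int.mod d 2)).sum = diffs.sum := by
  induction diffs with
  | nil => simp
  | cons x xs ih =>
    simp only [List.map, List.sum_cons]
    have hx := PySem.Int.floordiv_mul_add_mod x 2
    linarith

theorem even_closed (diffs : List Int) :
    PySem.Int.floordiv (diffs.sum - (diffs.map (fun d => PySem.Int.mod d 2)).sum) 2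
      = (diffs.map (fun d => PySem.Int.floordiv d 2)).sum := by
  have h := sum_split diffs
  rw [PySem.Int.floordiv_eq_ediv_of_pos (show (0:Int) < 2 by norm_num)]
  omega

-- ===== VERDICT (by name: the statement is the Claim_ definition above) =====
theorem solution_spec : Claim_equal_solution := by
  intro N trees _hdom hpre
  unfold Spec_solution solution solution_alt
  cases hmax : PySem.List.max? trees (fun x => x) with
  | none => exact absurd ((PySem.List.max?_eq_none_iff trees (fun x => x)).mp hmax) hpre
  | some m =>
    dsimp only
    rw [fold_acc trees m 0 0]
    simp only [zero_add, even_closed]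
    set diffs := trees.map (fun t => m - t) with hdiffs
    set E := (diffs.map (fun d => PySem.Int.floordiv d 2)).sum with hE
    set O := (diffs.map (fun d => PySem.Int.mod d 2)).sum with hO
    by_cases hgt : E > O
    · rw [if_pos hgt]
      rw [loop_eq_adjust (E - O).toNat E O (by omega) (by omega)]
      simp only [adjustPair]
    · rw [if_neg hgt]
      rw [if_neg (show ¬ (E - O > 1) by omega)]
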